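-- pv_equiv track=rewrite | github.com/EternityForest/KaithemAutomation | kaithem/src/jackmanager.py | compressnumbers
-- ===== SOURCE A (Python) =====
-- def compressnumbers(s):
--     """Take a string that's got a lot of numbers and try to make something
--         that represents that number. Tries to make
--         unique strings from things like usb-0000:00:14.0-2
--
--     """
--     n = ''
--     currentnum = ''
--     for i in s:
--         if i in '0123456789':
--             #Exclude leading zeros
--             if currentnum or (not(i=='0')):
--                 currentnum+=i
--         else:
--             n+=currentnum
--             currentnum=''
--
--     return n+currentnum
-- ===== SOURCE B (Python) =====
-- import re
--
-- def compressnumbers(s):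
--     return ''.join(run.lstrip('0') for run in re.findall(r'[0-9]+', s))
-- ===== Notes on version B (the rewrite author's own statement) =====
-- stated objective: idiomatic
-- what changed: Replaces the character-by-character state machine (accumulating the current number while skipping leading zeros) with regex tokenization: findall of maximal ASCII [0-9] runs, each lstrip'ed of zeros and joined.
import Mathlib
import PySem

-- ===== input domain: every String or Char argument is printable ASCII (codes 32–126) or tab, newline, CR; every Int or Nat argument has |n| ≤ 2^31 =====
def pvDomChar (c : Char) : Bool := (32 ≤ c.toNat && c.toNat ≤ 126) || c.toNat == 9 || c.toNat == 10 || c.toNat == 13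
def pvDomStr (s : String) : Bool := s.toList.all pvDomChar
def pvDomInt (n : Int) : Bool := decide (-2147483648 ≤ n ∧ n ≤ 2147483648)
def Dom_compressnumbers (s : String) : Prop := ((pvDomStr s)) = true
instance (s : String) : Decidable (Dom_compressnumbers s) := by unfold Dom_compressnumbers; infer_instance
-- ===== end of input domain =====

-- B replaces A's character-by-character state machine with regex-style tokenization:
-- extract maximal ASCII-digit runs, strip leading zeros from each, join (same return value).

-- ===== PORT A =====
-- the for-loop over s, with state (n, currentnum), as structural recursion
def pvLoopA : List Char → List Char → List Char → List Char
  | [], n, cur => n ++ cur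
  | i :: rest, n, cur =>
    if ("0123456789".toList.contains i) then      -- i in '0123456789'
      if cur ≠ [] ∨ ¬ (i = '0') then              -- if currentnum or (not(i=='0'))
        pvLoopA rest n (cur ++ [i])
      else
        pvLoopA rest n cur
    else
      pvLoopA rest (n ++ cur) []

def compressnumbers (s : String) : String :=
  String.ofList (pvLoopA s.toList [] [])

-- ===== PORT B =====
-- re.findall(r'[0-9]+', s): the maximal runs of ASCII digits, in order
def pvRuns : List Char → List (List Char)
  | [] => []
  | c :: rest =>
    if PySem.Chars.isdigit c then
      (c :: rest.takeWhile PySem.Chars.isdigit) :: pvRuns (rest.dropWhile PySem.Chars.isdigit)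
    else
      pvRuns rest
  termination_by cs => cs.length
  decreasing_by
    · simpa using Nat.lt_succ_of_le (List.length_dropWhile_le ..)
    · simp

-- run.lstrip('0'): exact, a single-character strip set means dropping leading '0's
def pvLstrip0 (r : List Char) : List Char := r.dropWhile (· == '0')

def compressnumbers_alt (s : String) : String :=
  String.ofList (((pvRuns s.toList).map pvLstrip0).flatten)

-- ===== PRECONDITION & SPEC =====
def Spec_compressnumbers (s : String) (out : String) : Prop := out = compressnumbers_alt s
instance (s : String) (out : String) : Decidable (Spec_compressnumbers s out) := by unfold Spec_compressnumbers; infer_instance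

-- ===== CLAIM (what is proved, stated in full; the proofs are below) =====
def Claim_equal_compressnumbers : Prop := ∀ (s : String), Dom_compressnumbers s → Spec_compressnumbers s (compressnumbers s)

-- ===== LEMMAS AND PROOFS =====

-- A's membership test `i in '0123456789'` coincides with the [0-9] class test
theorem pvDigEq (c : Char) : ("0123456789".toList.contains c) = PySem.Chars.isdigit c := by
  have h : "0123456789".toList = ['0','1','2','3','4','5','6','7','8','9'] := by decide
  rw [h, Bool.eq_iff_iff]
  simp only [List.contains_eq_mem, List.mem_cons, List.not_mem_nil, or_false, decide_eq_true_eq,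
    PySem.Chars.isdigit, Bool.and_eq_true, decide_eq_true_eq, Char.le_def]
  constructor
  · rintro (rfl|rfl|rfl|rfl|rfl|rfl|rfl|rfl|rfl|rfl) <;> exact ⟨by decide, by decide⟩
  · rintro ⟨h1, h2⟩
    have hl : 48 ≤ c.toNat := h1
    have hr : c.toNat ≤ 57 := h2
    have hone : c.toNat = 48 ∨ c.toNat = 49 ∨ c.toNat = 50 ∨ c.toNat = 51 ∨ c.toNat = 52 ∨
        c.toNat = 53 ∨ c.toNat = 54 ∨ c.toNat = 55 ∨ c.toNat = 56 ∨ c.toNat = 57 := by omega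
    have hchar : ∀ d : Char, c.toNat = d.toNat → c = d := by
      intro d hd
      exact Char.ext (UInt32.toNat_inj.mp (by simpa using hd))
    rcases hone with h|h|h|h|h|h|h|h|h|h
    · exact Or.inl (hchar '0' h)
    · exact Or.inr (Or.inl (hchar '1' h))
    · exact Or.inr (Or.inr (Or.inl (hchar '2' h)))
    · exact Or.inr (Or.inr (Or.inr (Or.inl (hchar '3' h))))
    · exact Or.inr (Or.inr (Or.inr (Or.inr (Or.inl (hchar '4' h)))))
    · exact Or.inr (Or.inr (Or.inr (Or.inr (Or.inr (Or.inl (hchar '5' h))))))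
    · exact Or.inr (Or.inr (Or.inr (Or.inr (Or.inr (Or.inr (Or.inl (hchar '6' h)))))))
    · exact Or.inr (Or.inr (Or.inr (Or.inr (Or.inr (Or.inr (Or.inr (Or.inl (hchar '7' h))))))))
    · exact Or.inr (Or.inr (Or.inr (Or.inr (Or.inr (Or.inr (Or.inr (Or.inr (Or.inl (hchar '8' h)))))))))
    · exact Or.inr (Or.inr (Or.inr (Or.inr (Or.inr (Or.inr (Or.inr (Or.inr (Or.inr (hchar '9' h)))))))))

-- inside a digit run with a nonempty current number, A just appends every character
theorem pvL1 (run : List Char) : ∀ (cs n cur : List Char),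
    (∀ c ∈ run, PySem.Chars.isdigit c) → cur ≠ [] →
    pvLoopA (run ++ cs) n cur = pvLoopA cs n (cur ++ run) := by
  induction run with
  | nil => intro cs n cur _ _; simp
  | cons c run' ih =>
    intro cs n cur hdig hcur
    have hc : ("0123456789".toList.contains c) = true := by
      rw [pvDigEq]; exact hdig c (by simp)
    simp only [List.cons_append, pvLoopA, hc, if_pos (Or.inl hcur), if_true]
    rw [ih cs n (cur ++ [c]) (fun d hd => hdig d (by simp [hd])) (by simp)]
    simp

-- starting a digit run with an empty current number, A accumulates the run minus leading zeros
theorem pvL2 (run : List Char) : ∀ (cs n : List Char),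
    (∀ c ∈ run, PySem.Chars.isdigit c) →
    pvLoopA (run ++ cs) n [] = pvLoopA cs n (pvLstrip0 run) := by
  induction run with
  | nil => intro cs n _; simp [pvLstrip0]
  | cons c run' ih =>
    intro cs n hdig
    have hc : ("0123456789".toList.contains c) = true := by
      rw [pvDigEq]; exact hdig c (by simp)
    by_cases h0 : c = '0'
    · subst h0
      simp only [List.cons_append, pvLoopA, hc, if_true]
      rw [if_neg (by simp)]
      rw [ih cs n (fun d hd => hdig d (by simp [hd]))]
      simp [pvLstrip0]
    · simp only [List.cons_append, pvLoopA, hc, if_true]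
      rw [if_pos (Or.inr h0)]
      simp only [List.nil_append]
      rw [pvL1 run' cs n [c] (fun d hd => hdig d (by simp [hd])) (by simp)]
      simp [pvLstrip0, h0]

theorem pvDropWhileHead {p : Char → Bool} : ∀ (l : List Char) (d : Char) (more : List Char),
    l.dropWhile p = d :: more → p d = false := by
  intro l
  induction l with
  | nil => intro d more h; simp [List.dropWhile] at h
  | cons x xs ih =>
    intro d more h
    by_cases hx : p x
    · rw [List.dropWhile_cons, if_pos hx] at h; exact ih d more h
    · rw [List.dropWhile_cons, if_neg hx] at h
      cases h; simpa using hx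

-- the main invariant: A's loop from state (n, []) produces n followed by B's joined stripped runs
theorem pvMain : ∀ (k : ℕ) (cs n : List Char), cs.length ≤ k →
    pvLoopA cs n [] = n ++ ((pvRuns cs).map pvLstrip0).flatten := by
  intro k
  induction k with
  | zero =>
    intro cs n h
    have : cs = [] := List.eq_nil_of_length_eq_zero (Nat.le_zero.mp h)
    subst this; simp [pvLoopA, pvRuns]
  | succ k ih =>
    intro cs n h
    match cs with
    | [] => simp [pvLoopA, pvRuns]
    | c :: rest =>
      by_cases hd : PySem.Chars.isdigit c
      · -- digit: the whole maximal run is consumed in one step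
        have hsplit : c :: rest = (c :: rest.takeWhile PySem.Chars.isdigit) ++
            rest.dropWhile PySem.Chars.isdigit := by
          simp [List.takeWhile_append_dropWhile]
        have hrun : ∀ d ∈ c :: rest.takeWhile PySem.Chars.isdigit, PySem.Chars.isdigit d := by
          intro d hdm
          rcases List.mem_cons.mp hdm with rfl | hdm
          · exact hd
          · exact List.mem_takeWhile_imp hdm
        have hruns : pvRuns (c :: rest) =
            (c :: rest.takeWhile PySem.Chars.isdigit) ::
              pvRuns (rest.dropWhile PySem.Chars.isdigit) := by
          rw [pvRuns]; rw [if_pos hd]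
        rw [hruns]
        conv_lhs => rw [hsplit]
        rw [pvL2 _ _ _ hrun]
        match hrest : rest.dropWhile PySem.Chars.isdigit with
        | [] => simp [pvLoopA, pvRuns]
        | d :: more =>
          have hnd : PySem.Chars.isdigit d = false := pvDropWhileHead rest d more hrest
          have hcont : ("0123456789".toList.contains d) = false := by rw [pvDigEq]; exact hnd
          rw [pvLoopA, if_neg (by rw [hcont]; simp)]
          have hlen : more.length ≤ k := by
            have h1 : (rest.dropWhile PySem.Chars.isdigit).length ≤ rest.length :=
              List.length_dropWhile_le ..
            rw [hrest] at h1
            simp only [List.length_cons] at h1 h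
            omega
          rw [ih more (n ++ pvLstrip0 (c :: rest.takeWhile PySem.Chars.isdigit)) hlen]
          have hmr : pvRuns (d :: more) = pvRuns more := by
            rw [pvRuns]; rw [if_neg (by simp [hnd])]
          rw [hmr]  -- pvRuns of the leftover starts past the nondigit d
          simp
      · -- nondigit: both sides just skip c
        have hcont : ("0123456789".toList.contains c) = false := by
          rw [pvDigEq]; simpa using hd
        rw [pvLoopA, if_neg (by rw [hcont]; simp)]
        have hruns : pvRuns (c :: rest) = pvRuns rest := by
          rw [pvRuns]; rw [if_neg (by simp [hd])]
        rw [hruns, ih rest (n ++ []) (by simp at h ⊢; omega)]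
        simp

-- ===== VERDICT (by name: the statement is the Claim_ definition above) =====
theorem compressnumbers_spec : Claim_equal_compressnumbers := by
  intro s _
  unfold Spec_compressnumbers compressnumbers compressnumbers_alt
  rw [pvMain s.toList.length s.toList [] (le_refl _)]
  simp
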